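-- pv_equiv track=rewrite | github.com/stopman/codereview-openrouter-mcp | codereview_openrouter_mcp/git_ops.py | filter_binary_diffs
-- ===== SOURCE A (Python) =====
-- def filter_binary_diffs(diff: str) -> str:
--     lines = diff.split("\n")
--     filtered = []
--     skip = False
--     for line in lines:
--         if line.startswith("diff --git"):
--             skip = False
--             filtered.append(line)
--         elif "Binary file" in line or line.startswith("GIT binary patch"):
--             skip = True
--             filtered.append("[binary file skipped]")
--         elif not skip:
--             filtered.append(line)
--     return "\n".join(filtered)
-- ===== SOURCE B (Python) =====
-- def _scrub(body):
--     # replace binary-marker lines, drop everything after the first marker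
--     kept = []
--     skip = False
--     for line in body:
--         if "Binary file" in line or line.startswith("GIT binary patch"):
--             skip = True
--             kept.append("[binary file skipped]")
--         elif not skip:
--             kept.append(line)
--     return kept
--
--
-- def _emit(out, header, body):
--     if header is not None:
--         out.append(header)
--     out.extend(_scrub(body))
--
--
-- def filter_binary_diffs(diff: str) -> str:
--     # Partition the diff into per-file sections at 'diff --git' headers,
--     # then scrub each section's body independently.
--     out = []
--     header = None
--     body = []
--     for line in diff.split("\n"):
--         if line.startswith("diff --git"):
--             _emit(out, header, body)
--             header, body = line, []
--         else:
--             body.append(line)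
--     _emit(out, header, body)
--     return "\n".join(out)
-- ===== Notes on version B (the rewrite author's own statement) =====
-- stated objective: alternative
-- what changed: Instead of one pass with a skip flag reset at headers, B partitions the diff into per-file sections at the git file-header lines and scrubs each section's body with an independent helper pass, emitting header then scrubbed body.
import Mathlib
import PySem

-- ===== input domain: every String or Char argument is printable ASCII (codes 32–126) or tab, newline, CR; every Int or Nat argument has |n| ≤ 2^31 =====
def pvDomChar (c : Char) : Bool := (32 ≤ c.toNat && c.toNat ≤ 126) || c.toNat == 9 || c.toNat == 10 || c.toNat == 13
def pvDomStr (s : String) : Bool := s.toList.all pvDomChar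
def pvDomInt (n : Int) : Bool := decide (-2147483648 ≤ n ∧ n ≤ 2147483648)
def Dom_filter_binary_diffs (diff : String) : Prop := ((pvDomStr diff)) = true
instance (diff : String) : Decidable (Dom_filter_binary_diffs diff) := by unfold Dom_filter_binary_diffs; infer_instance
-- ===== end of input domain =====

-- B partitions the diff into per-file sections at the git file-header lines and scrubs each
-- section's body independently (objective: alternative decomposition, same cost).

-- line tests both Pythons literally contain
def pvIsHeader (line : String) : Bool := PySem.Str.startswith line "diff --git"
def pvIsBinary (line : String) : Bool :=
  PySem.Str.isIn "Binary file" line || PySem.Str.startswith line "GIT binary patch"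

-- ===== PORT A =====
-- loop state: (filtered, skip)
def pvAStep (st : List String × Bool) (line : String) : List String × Bool :=
  if pvIsHeader line then (st.1 ++ [line], false)
  else if pvIsBinary line then (st.1 ++ ["[binary file skipped]"], true)
  else if !st.2 then (st.1 ++ [line], st.2)
  else st

def filter_binary_diffs (diff : String) : String :=
  let lines := (PySem.Str.split? diff "\n").getD []
  PySem.Str.join "\n" (lines.foldl pvAStep ([], false)).1

-- ===== PORT B =====
-- _scrub: loop state (kept, skip)
def pvScrubStep (st : List String × Bool) (line : String) : List String × Bool :=
  if pvIsBinary line then (st.1 ++ ["[binary file skipped]"], true)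
  else if !st.2 then (st.1 ++ [line], st.2)
  else st

def pvScrub (body : List String) : List String := (body.foldl pvScrubStep ([], false)).1

def pvEmit (out : List String) (header : Option String) (body : List String) : List String :=
  (match header with | some h => out ++ [h] | none => out) ++ pvScrub body

-- main loop state: (out, header, body)
def pvBStep (st : List String × Option String × List String) (line : String) :
    List String × Option String × List String :=
  if pvIsHeader line then (pvEmit st.1 st.2.1 st.2.2, some line, [])
  else (st.1, st.2.1, st.2.2 ++ [line])

def filter_binary_diffs_alt (diff : String) : String :=
  let lines := (PySem.Str.split? diff "\n").getD []
  let st := lines.foldl pvBStep ([], none, [])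
  PySem.Str.join "\n" (pvEmit st.1 st.2.1 st.2.2)

-- ===== PRECONDITION & SPEC =====
def Spec_filter_binary_diffs (diff : String) (out : String) : Prop := out = filter_binary_diffs_alt diff
instance (diff : String) (out : String) : Decidable (Spec_filter_binary_diffs diff out) := by unfold Spec_filter_binary_diffs; infer_instance

-- ===== CLAIM (what is proved, stated in full; the proofs are below) =====
def Claim_equal_filter_binary_diffs : Prop := ∀ (diff : String), Dom_filter_binary_diffs diff → Spec_filter_binary_diffs diff (filter_binary_diffs diff)

-- ===== LEMMAS AND PROOFS =====

-- cons-style reading of A's loop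
def pvAList : List String → Bool → List String
  | [], _ => []
  | l :: rest, skip =>
    if pvIsHeader l then l :: pvAList rest false
    else if pvIsBinary l then "[binary file skipped]" :: pvAList rest true
    else if !skip then l :: pvAList rest skip
    else pvAList rest skip

-- cons-style reading of _scrub, and the skip flag it leaves behind
def pvSList : List String → Bool → List String
  | [], _ => []
  | l :: rest, skip =>
    if pvIsBinary l then "[binary file skipped]" :: pvSList rest true
    else if !skip then l :: pvSList rest skip
    else pvSList rest skip

def pvSA : List String → Bool → Bool
  | [], skip => skip
  | l :: rest, skip => pvSA rest (if pvIsBinary l then true else skip)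

theorem pvAFold_eq (lines : List String) : ∀ (skip : Bool) (acc : List String),
    (lines.foldl pvAStep (acc, skip)).1 = acc ++ pvAList lines skip := by
  induction lines with
  | nil => intro skip acc; simp [pvAList]
  | cons l rest ih =>
    intro skip acc
    simp only [List.foldl_cons, pvAStep, pvAList]
    by_cases h1 : pvIsHeader l = true <;> by_cases h2 : pvIsBinary l = true <;>
      cases skip <;> simp [h1, h2, ih]

theorem pvSFold_eq (lines : List String) : ∀ (skip : Bool) (acc : List String),
    (lines.foldl pvScrubStep (acc, skip)).1 = acc ++ pvSList lines skip := by
  induction lines with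
  | nil => intro skip acc; simp [pvSList]
  | cons l rest ih =>
    intro skip acc
    simp only [List.foldl_cons, pvScrubStep, pvSList]
    by_cases h2 : pvIsBinary l = true <;> cases skip <;> simp [h2, ih]

theorem pvSList_append (xs ys : List String) : ∀ skip,
    pvSList (xs ++ ys) skip = pvSList xs skip ++ pvSList ys (pvSA xs skip) := by
  induction xs with
  | nil => intro skip; simp [pvSList, pvSA]
  | cons l rest ih =>
    intro skip
    simp only [List.cons_append, pvSList, pvSA]
    by_cases h2 : pvIsBinary l = true <;> cases skip <;> simp [h2, ih]

theorem pvSA_append (xs ys : List String) : ∀ skip,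
    pvSA (xs ++ ys) skip = pvSA ys (pvSA xs skip) := by
  induction xs with
  | nil => intro skip; simp [pvSA]
  | cons l rest ih => intro skip; simp [pvSA, ih]

def pvHdr : Option String → List String
  | some h => [h]
  | none => []

theorem pvEmit_eq (out : List String) (header : Option String) (body : List String) :
    pvEmit out header body = out ++ pvHdr header ++ pvSList body false := by
  cases header <;> simp [pvEmit, pvHdr, pvScrub, pvSFold_eq]

theorem pvBMain_eq (lines : List String) : ∀ (header : Option String) (cur out : List String),
    (let st := lines.foldl pvBStep (out, header, cur)
     pvEmit st.1 st.2.1 st.2.2)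
    = out ++ pvHdr header ++ pvSList cur false ++ pvAList lines (pvSA cur false) := by
  induction lines with
  | nil =>
    intro header cur out
    simp [pvEmit_eq, pvAList]
  | cons l rest ih =>
    intro header cur out
    simp only [List.foldl_cons, pvBStep]
    by_cases h1 : pvIsHeader l = true
    · simp only [h1, if_pos]
      rw [show (pvEmit out header cur, some l, ([] : List String)) =
            ((pvEmit out header cur : List String), (some l : Option String), ([] : List String)) from rfl]
      rw [ih]
      simp [pvEmit_eq, pvHdr, pvSList, pvSA, pvAList, h1]
    · simp only [h1, if_neg, Bool.not_eq_true]
      rw [show ((out, header, cur ++ [l]) : List String × Option String × List String) =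
            (out, header, cur ++ [l]) from rfl]
      rw [ih]
      rw [pvSList_append, pvSA_append]
      simp only [pvAList, h1]
      by_cases h2 : pvIsBinary l = true
      · cases hs : pvSA cur false <;> simp [pvSList, pvSA, h2]
      · cases hs : pvSA cur false <;> simp [pvSList, pvSA, h2]

-- ===== VERDICT (by name: the statement is the Claim_ definition above) =====
theorem filter_binary_diffs_spec : Claim_equal_filter_binary_diffs := by
  intro diff _
  unfold Spec_filter_binary_diffs filter_binary_diffs filter_binary_diffs_alt
  simp only []
  rw [pvAFold_eq, pvBMain_eq]
  simp [pvHdr, pvSList, pvSA]
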